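-- pv_equiv track=rewrite | github.com/Ganesh4822/adventofcode | Day25/solution.py | get_column_sum
-- ===== SOURCE A (Python) =====
-- def get_column_sum(input_arr):
--     input_col_sum = []
--     for i in range(0,len(input_arr),5):
--         group = input_arr[i:i + 5]
--         group_sum = [0] * len(group[0])
--         for row in group:
--             for j,c in enumerate(row):
--                 if c == '#':
--                     group_sum[j] += 1
--         input_col_sum.append(group_sum)
--     return input_col_sum
-- ===== SOURCE B (Python) =====
-- def get_column_sum(input_arr):
--     # One flat pass over all characters: each '#' yields a key (row_index // 5, column);
--     # count the keys in a dict, then assemble each group's tally from the counter.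
--     hits = [(r // 5, j)
--             for r, row in enumerate(input_arr)
--             for j, c in enumerate(row) if c == '#']
--     counts = {}
--     for k in hits:
--         counts[k] = counts.get(k, 0) + 1
--     return [[counts.get((g, j), 0) for j in range(len(input_arr[5 * g]))]
--             for g in range((len(input_arr) + 4) // 5)]
-- ===== Notes on version B (the rewrite author's own statement) =====
-- stated objective: alternative
-- what changed: A slices the input into 5-row groups and mutates a per-column tally list while scanning each group's rows; B never slices: it makes one flat pass over all characters emitting a key (row//5, column) per '#', counts the keys in a dict, and assembles each group's row afterwards by dict lookup.
import Mathlib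
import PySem

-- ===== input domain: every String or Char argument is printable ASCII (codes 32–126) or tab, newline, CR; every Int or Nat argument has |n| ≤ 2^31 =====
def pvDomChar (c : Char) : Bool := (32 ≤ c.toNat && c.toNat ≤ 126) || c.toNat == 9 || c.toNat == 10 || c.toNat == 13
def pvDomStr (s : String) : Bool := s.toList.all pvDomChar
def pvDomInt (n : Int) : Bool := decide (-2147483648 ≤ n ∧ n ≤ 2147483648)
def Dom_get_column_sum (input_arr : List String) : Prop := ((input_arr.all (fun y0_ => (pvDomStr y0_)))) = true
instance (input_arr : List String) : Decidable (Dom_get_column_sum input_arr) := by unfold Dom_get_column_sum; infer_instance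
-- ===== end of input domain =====

-- B replaces A's group-slicing tally mutation with a single flat pass that emits a key
-- (row//5, column) per '#', counts keys in a dict, and assembles groups by lookup
-- (objective: alternative; same values wherever A returns).

-- ===== PORT A =====
-- inner loop "for j,c in enumerate(row): if c == '#': group_sum[j] += 1";
-- pyGetD/pySetD are exact for 0 ≤ j < len(group_sum); Python raises IndexError for j ≥ len(group_sum),
-- and exactly those inputs are excluded by Pre_get_column_sum.
def pvA_rowstep (gs : List Int) (row : List Char) : List Int :=
  (PySem.List.enumerate row).foldl
    (fun gs jc =>
      if jc.2 = '#' then PySem.List.pySetD gs jc.1 (PySem.List.pyGetD gs jc.1 0 + 1) else gs)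
    gs

-- body of "for i in range(0, len(input_arr), 5)"; group[0] via pyGetD with default "":
-- exact because each i the range yields has i < len(input_arr), so group is nonempty.
def pvA_group (input_arr : List String) (i : Int) : List Int :=
  let group := PySem.List.slice input_arr (some i) (some (i + 5))
  let group_sum := List.replicate (PySem.Str.len (PySem.List.pyGetD group 0 "")).toNat (0 : Int)
  group.foldl (fun gs row => pvA_rowstep gs row.toList) group_sum

def get_column_sum (input_arr : List String) : List (List Int) :=
  (PySem.List.pyRange 0 (input_arr.length : Int) 5).foldl
    (fun acc i => acc ++ [pvA_group input_arr i]) []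

-- ===== PORT B =====
-- "[(r // 5, j) for r, row in enumerate(input_arr) for j, c in enumerate(row) if c == '#']"
def pvB_hits (input_arr : List String) : List (Int × Int) :=
  (PySem.List.enumerate input_arr).flatMap (fun rrow =>
    ((PySem.List.enumerate rrow.2.toList).filter (fun jc => jc.2 == '#')).map
      (fun jc => (PySem.Int.floordiv rrow.1 5, jc.1)))

-- "for k in hits: counts[k] = counts.get(k, 0) + 1" then the nested list comprehension;
-- input_arr[5 * g] via pyGetD with default "": exact because 5*g < len(input_arr) for
-- every g that range((len(input_arr) + 4) // 5) yields.
def get_column_sum_alt (input_arr : List String) : List (List Int) :=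
  let counts := (pvB_hits input_arr).foldl
    (fun d k => d.insert k (d.getD k 0 + 1)) PySem.Dict.empty
  (PySem.List.pyRange 0 (PySem.Int.floordiv ((input_arr.length : Int) + 4) 5) 1).map (fun g =>
    (PySem.List.pyRange 0 (PySem.Str.len (PySem.List.pyGetD input_arr (5 * g) "")) 1).map
      (fun j => counts.getD (g, j) 0))

-- ===== PRECONDITION & SPEC =====
-- Pre_ excludes exactly the inputs where A raises IndexError: some row carries '#' at a column
-- index ≥ the length of the first row of its 5-row group. A returns on every input admitted here.
def Pre_get_column_sum (input_arr : List String) : Prop :=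
  ∀ i, i < input_arr.length →
    (((input_arr.getD i "").toList.drop ((input_arr.getD (i / 5 * 5) "").toList.length)).all
      (fun c => !(c == '#'))) = true
instance (input_arr : List String) : Decidable (Pre_get_column_sum input_arr) := by
  unfold Pre_get_column_sum; infer_instance

def pvWitness_get_column_sum : List String := ["#.", ".#"]

def Spec_get_column_sum (input_arr : List String) (out : List (List Int)) : Prop :=
  out = get_column_sum_alt input_arr
instance (input_arr : List String) (out : List (List Int)) : Decidable (Spec_get_column_sum input_arr out) := by
  unfold Spec_get_column_sum; infer_instance

-- ===== CLAIM (what is proved, stated in full; the proofs are below) =====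
def Claim_equal_get_column_sum : Prop := ∀ (input_arr : List String), Dom_get_column_sum input_arr → Pre_get_column_sum input_arr → Spec_get_column_sum input_arr (get_column_sum input_arr)

-- ===== LEMMAS AND PROOFS =====

-- one hit of "group_sum[j] += 1" counted per column, row scanned from offset s
def pvCnt (row : List Char) (s j : Nat) : Int :=
  if s ≤ j ∧ j - s < row.length ∧ row.getD (j - s) ' ' = '#' then 1 else 0

-- column count over a list of rows
def pvCol (group : List String) (j : Nat) : Int :=
  (group.map (fun row =>
    if j < row.toList.length ∧ row.toList.getD j ' ' = '#' then (1 : Int) else 0)).sum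

-- the common closed form both ports are reduced to
def pvClosed (arr : List String) : List (List Int) :=
  (List.range ((arr.length + 4) / 5)).map (fun g =>
    (List.range ((arr.getD (5 * g) "").toList.length)).map
      (fun j => pvCol ((arr.drop (5 * g)).take 5) j))

lemma set_map_range {w s : Nat} (f : Nat → Int) (v : Int) (hs : s < w) :
    ((List.range w).map f).set s v = (List.range w).map (fun j => if j = s then v else f j) := by
  apply List.ext_getElem
  · simp
  · intro i h1 h2
    by_cases hi : i = s
    · subst hi
      rw [List.getElem_set_self (by simpa using hs), List.getElem_map, List.getElem_range, if_pos rfl]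
    · rw [List.getElem_set_ne (by omega)]
      simp only [List.getElem_map, List.getElem_range]
      rw [if_neg hi]

lemma pvCnt_cons_ne (c : Char) (row : List Char) (s j : Nat) (hne : j ≠ s) :
    pvCnt (c :: row) s j = pvCnt row (s + 1) j := by
  unfold pvCnt
  by_cases hle : s + 1 ≤ j
  · have e2 : j - (s + 1) = j - s - 1 := by omega
    have e1 : j - s = (j - s - 1) + 1 := by omega
    rw [e2, e1]
    simp only [List.length_cons, List.getD_cons_succ]
    apply if_congr _ rfl rfl
    constructor
    · rintro ⟨-, h2, h3⟩; exact ⟨by omega, by omega, h3⟩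
    · rintro ⟨-, h2, h3⟩; exact ⟨by omega, by omega, h3⟩
  · rw [if_neg (by rintro ⟨h1, -, -⟩; omega), if_neg (by rintro ⟨h1, -, -⟩; omega)]

lemma pvCnt_cons_self (c : Char) (row : List Char) (s : Nat) :
    pvCnt (c :: row) s s = if c = '#' then 1 else 0 := by
  unfold pvCnt
  have e : s - s = 0 := Nat.sub_self s
  rw [e]
  simp only [List.length_cons, List.getD_cons_zero]
  apply if_congr _ rfl rfl
  constructor
  · rintro ⟨-, -, h3⟩; exact h3
  · intro h3; exact ⟨le_rfl, by omega, h3⟩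

lemma pvCnt_tail (row : List Char) (s j : Nat) (h : j < s) : pvCnt row s j = 0 := by
  unfold pvCnt
  rw [if_neg (by rintro ⟨h1, -, -⟩; omega)]

lemma pvCnt_nil (s j : Nat) : pvCnt [] s j = 0 := by
  unfold pvCnt
  rw [if_neg (by rintro ⟨-, h2, -⟩; simp at h2)]

lemma pvCnt_zero (row : List Char) (j : Nat) :
    pvCnt row 0 j = if j < row.length ∧ row.getD j ' ' = '#' then 1 else 0 := by
  unfold pvCnt
  apply if_congr _ rfl rfl
  constructor
  · rintro ⟨-, h2, h3⟩; exact ⟨by omega, by simpa using h3⟩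
  · rintro ⟨h2, h3⟩; exact ⟨Nat.zero_le j, by omega, by simpa using h3⟩

-- ========== A side ==========

lemma pvA_fold_eq (row : List Char) : ∀ (s : Nat) (w : Nat) (f : Nat → Int),
    (∀ i, (hi : i < row.length) → row[i] = '#' → s + i < w) →
    (PySem.List.enumerate row (s : Int)).foldl
      (fun gs jc =>
        if jc.2 = '#' then PySem.List.pySetD gs jc.1 (PySem.List.pyGetD gs jc.1 0 + 1) else gs)
      ((List.range w).map f)
      = (List.range w).map (fun j => f j + pvCnt row s j) := by
  induction row with
  | nil =>
    intro s w f _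
    simp only [PySem.List.enumerate_nil, List.foldl_nil]
    apply List.map_congr_left
    intro j _
    rw [pvCnt_nil, add_zero]
  | cons c row ih =>
    intro s w f h
    rw [PySem.List.enumerate_cons, List.foldl_cons]
    by_cases hc : c = '#'
    · have hsw : s < w := by have := h 0 (by simp) (by simpa using hc); omega
      rw [if_pos hc]
      rw [PySem.List.pyGetD_natCast, PySem.List.pySetD_natCast]
      rw [List.getD_eq_getElem _ _ (by simpa using hsw), List.getElem_map, List.getElem_range]
      rw [set_map_range f (f s + 1) hsw]
      rw [show ((s : Int) + 1) = ((s + 1 : Nat) : Int) by push_cast; ring]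
      rw [ih (s + 1) w (fun j => if j = s then f s + 1 else f j)
        (fun i hi hh => by have := h (i + 1) (by simpa using hi) (by simpa using hh); omega)]
      apply List.map_congr_left
      intro j hj
      by_cases hjs : j = s
      · subst hjs
        rw [if_pos rfl, pvCnt_cons_self, if_pos hc, pvCnt_tail _ _ _ (by omega), add_zero]
      · rw [if_neg hjs, pvCnt_cons_ne c row s j hjs]
    · rw [if_neg hc]
      rw [show ((s : Int) + 1) = ((s + 1 : Nat) : Int) by push_cast; ring]
      rw [ih (s + 1) w f
        (fun i hi hh => by have := h (i + 1) (by simpa using hi) (by simpa using hh); omega)]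
      apply List.map_congr_left
      intro j hj
      by_cases hjs : j = s
      · subst hjs
        rw [pvCnt_cons_self, if_neg hc, pvCnt_tail _ _ _ (by omega)]
      · rw [pvCnt_cons_ne c row s j hjs]

lemma pvA_rows_eq (group : List String) : ∀ (w : Nat) (f : Nat → Int),
    (∀ row ∈ group, ∀ i, (hi : i < row.toList.length) → row.toList[i] = '#' → i < w) →
    group.foldl (fun gs row => pvA_rowstep gs row.toList) ((List.range w).map f)
      = (List.range w).map (fun j => f j + pvCol group j) := by
  induction group with
  | nil =>
    intro w f _
    simp [pvCol]
  | cons r rest ih =>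
    intro w f h
    rw [List.foldl_cons]
    have hr : pvA_rowstep ((List.range w).map f) r.toList
        = (List.range w).map (fun j => f j + pvCnt r.toList 0 j) := by
      unfold pvA_rowstep
      simpa using pvA_fold_eq r.toList 0 w f
        (fun i hi hh => by
          have := h r (by simp) i hi hh
          omega)
    rw [hr, ih w (fun j => f j + pvCnt r.toList 0 j)
      (fun row hrow i hi hh => h row (by simp [hrow]) i hi hh)]
    apply List.map_congr_left
    intro j _
    simp only [pvCol, List.map_cons, List.sum_cons, pvCnt_zero]
    ring

lemma pyRange5 (n : Nat) :
    PySem.List.pyRange 0 (n : Int) 5 = (List.range ((n + 4) / 5)).map (fun k => ((5 * k : Nat) : Int)) := by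
  rw [PySem.List.pyRange_of_pos _ _ (by norm_num)]
  have h : (if (0:Int) < (n:Int) then (((n:Int) - 0 + 5 - 1) / 5).toNat else 0) = (n + 4) / 5 := by
    split_ifs with h
    · omega
    · omega
  rw [h]
  apply List.map_congr_left
  intro k _
  push_cast
  ring

lemma pre_group (arr : List String) (h : Pre_get_column_sum arr) (g : Nat)
    (hg : 5 * g < arr.length) :
    ∀ row ∈ (arr.drop (5 * g)).take 5, ∀ i, (hi : i < row.toList.length) →
      row.toList[i] = '#' → i < (arr.getD (5 * g) "").toList.length := by
  intro row hrow i hi hsharp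
  by_contra hge0
  have hge := Nat.le_of_not_lt hge0
  obtain ⟨r, hr, heq⟩ := List.mem_iff_getElem.mp hrow
  have hr5 : r < 5 := by
    have := hr; rw [List.length_take] at this; omega
  have hrlen : 5 * g + r < arr.length := by
    have := hr; rw [List.length_take, List.length_drop] at this; omega
  have hrow_eq : arr.getD (5 * g + r) "" = row := by
    rw [List.getD_eq_getElem _ _ hrlen, ← heq, List.getElem_take, List.getElem_drop]
  have hidx : (5 * g + r) / 5 * 5 = 5 * g := by omega
  have hall := h (5 * g + r) hrlen
  rw [hrow_eq, hidx] at hall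
  have hidx2 : arr.getD (5 * g) "" = arr.getD (5 * g) "" := rfl
  rw [List.all_eq_true] at hall
  have hmem : row.toList[i] ∈ row.toList.drop (arr.getD (5 * g) "").toList.length := by
    have hlt : i - (arr.getD (5 * g) "").toList.length
        < (row.toList.drop (arr.getD (5 * g) "").toList.length).length := by
      rw [List.length_drop]; omega
    have : (row.toList.drop (arr.getD (5 * g) "").toList.length)[i - (arr.getD (5 * g) "").toList.length]'hlt
        = row.toList[i]'hi := by
      rw [List.getElem_drop]; congr 1; omega
    rw [← this]
    exact List.getElem_mem hlt
  have := hall _ hmem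
  rw [hsharp] at this
  simp at this

lemma A_group_closed (arr : List String) (h : Pre_get_column_sum arr) (g : Nat)
    (hg : 5 * g < arr.length) :
    pvA_group arr ((5 * g : Nat) : Int)
      = (List.range ((arr.getD (5 * g) "").toList.length)).map
          (fun j => pvCol ((arr.drop (5 * g)).take 5) j) := by
  simp only [pvA_group]
  rw [show (((5 * g : Nat) : Int) + 5) = (((5 * g : Nat) : Int) + ((5 : Nat) : Int)) by norm_num,
    PySem.List.slice_natCast_add]
  have hlen0 : 0 < ((arr.drop (5 * g)).take 5).length := by
    rw [List.length_take, List.length_drop]; omega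
  have hget : PySem.List.pyGetD ((arr.drop (5 * g)).take 5) 0 "" = arr.getD (5 * g) "" := by
    rw [PySem.List.pyGetD_zero, List.getD_eq_getElem _ _ hlen0,
      List.getElem_take, List.getElem_drop, List.getD_eq_getElem _ _ (by omega)]
    simp
  rw [hget, PySem.Str.len_eq, Int.toNat_natCast]
  rw [show List.replicate (arr.getD (5 * g) "").toList.length (0 : Int)
        = (List.range ((arr.getD (5 * g) "").toList.length)).map (fun _ => (0 : Int)) from by simp]
  rw [pvA_rows_eq ((arr.drop (5 * g)).take 5) _ (fun _ => 0) (pre_group arr h g hg)]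
  apply List.map_congr_left
  intro j _
  ring

lemma A_closed (arr : List String) (h : Pre_get_column_sum arr) :
    get_column_sum arr = pvClosed arr := by
  unfold get_column_sum pvClosed
  rw [PySem.List.foldl_append_singleton_eq_map (pvA_group arr), pyRange5, List.map_map]
  simp only [List.nil_append]
  apply List.map_congr_left
  intro g hg
  have hglt : 5 * g < arr.length := by
    rw [List.mem_range] at hg; omega
  exact A_group_closed arr h g hglt

-- ========== B side ==========

-- count of the key (q, j) among one row's emitted hits
lemma row_count (q : Int) (g j : Nat) (row : List Char) : ∀ (s : Nat),
    ((((PySem.List.enumerate row (s : Int)).filter (fun jc => jc.2 == '#')).map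
        (fun jc => (q, jc.1))).count ((g : Int), (j : Int)))
      = if (g : Int) = q then (pvCnt row s j).toNat else 0 := by
  induction row with
  | nil =>
    intro s
    rw [pvCnt_nil]
    simp [PySem.List.enumerate_nil]
  | cons c rest ih =>
    intro s
    rw [PySem.List.enumerate_cons, List.filter_cons]
    by_cases hc : c = '#'
    · rw [if_pos (by simpa using hc), List.map_cons, List.count_cons]
      rw [show ((s : Int) + 1) = ((s + 1 : Nat) : Int) by push_cast; ring, ih (s + 1)]
      by_cases hjs : j = s
      · subst hjs
        rw [pvCnt_cons_self, if_pos hc, pvCnt_tail rest (j + 1) j (by omega)]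
        by_cases hq : (g : Int) = q
        · have hb : ((q, (((j : Int)), c).1) == ((g : Int), (j : Int))) = true := by
            simp [hq.symm]
          rw [hb]
          simp [hq]
        · have hb : ((q, (((j : Int)), c).1) == ((g : Int), (j : Int))) = false := by
            simp only [beq_eq_false_iff_ne, ne_eq, Prod.mk.injEq, not_and]
            intro hqg
            exact absurd hqg.symm hq
          rw [hb]
          simp [hq]
      · rw [pvCnt_cons_ne c rest s j hjs]
        have hb : ((q, (((s : Int)), c).1) == ((g : Int), (j : Int))) = false := by
          simp only [beq_eq_false_iff_ne, ne_eq, Prod.mk.injEq, not_and]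
          intro _ hj'
          exact hjs (by exact_mod_cast hj'.symm)
        rw [hb]
        simp
    · rw [if_neg (by simpa using hc)]
      rw [show ((s : Int) + 1) = ((s + 1 : Nat) : Int) by push_cast; ring, ih (s + 1)]
      by_cases hjs : j = s
      · subst hjs
        rw [pvCnt_tail rest (j + 1) j (by omega), pvCnt_cons_self, if_neg hc]
      · rw [pvCnt_cons_ne c rest s j hjs]

lemma pvCol_nonneg (group : List String) (j : Nat) : 0 ≤ pvCol group j := by
  apply List.sum_nonneg
  intro x hx
  obtain ⟨r, -, rfl⟩ := List.mem_map.mp hx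
  split_ifs <;> norm_num

-- hit count of (g, j) over a suffix of rows starting at global index s, 5*g ≤ s
lemma hits_count_ge (g j : Nat) : ∀ (rows : List String) (s : Nat), 5 * g ≤ s →
    (((PySem.List.enumerate rows (s : Int)).flatMap (fun rrow =>
        ((PySem.List.enumerate rrow.2.toList).filter (fun jc => jc.2 == '#')).map
          (fun jc => (PySem.Int.floordiv rrow.1 5, jc.1)))).count ((g : Int), (j : Int)))
      = (pvCol (rows.take (5 * (g + 1) - s)) j).toNat := by
  intro rows
  induction rows with
  | nil =>
    intro s _
    simp [PySem.List.enumerate_nil, pvCol]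
  | cons row rest ih =>
    intro s hs
    rw [PySem.List.enumerate_cons, List.flatMap_cons, List.count_append]
    rw [show (((s : Int), row) : Int × String).2 = row from rfl,
        show (((s : Int), row) : Int × String).1 = (s : Int) from rfl]
    have hfd : PySem.Int.floordiv ((s : Int)) 5 = ((s / 5 : Nat) : Int) := by
      exact_mod_cast PySem.Int.floordiv_natCast s 5
    have hrow := row_count (((s / 5 : Nat) : Int)) g j row.toList 0
    simp only [Nat.cast_zero] at hrow
    rw [show ((s : Int) + 1) = ((s + 1 : Nat) : Int) by push_cast; ring,
      ih (s + 1) (by omega)]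
    by_cases hlt : s < 5 * (g + 1)
    · have hgq : (g : Int) = ((s / 5 : Nat) : Int) := by
        have : s / 5 = g := by omega
        omega
      rw [hfd, hrow, if_pos hgq]
      have htake : (row :: rest).take (5 * (g + 1) - s)
          = row :: rest.take (5 * (g + 1) - (s + 1)) := by
        rw [show 5 * (g + 1) - s = (5 * (g + 1) - (s + 1)) + 1 by omega, List.take_succ_cons]
      rw [htake]
      rw [show pvCol (row :: rest.take (5 * (g + 1) - (s + 1))) j
            = (if j < row.toList.length ∧ row.toList.getD j ' ' = '#' then (1 : Int) else 0)
              + pvCol (rest.take (5 * (g + 1) - (s + 1))) j from by simp [pvCol]]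
      rw [← pvCnt_zero]
      have h2 := pvCol_nonneg (rest.take (5 * (g + 1) - (s + 1))) j
      have h1 : (0 : Int) ≤ pvCnt row.toList 0 j := by
        unfold pvCnt; split_ifs <;> norm_num
      omega
    · have hgq : ¬ ((g : Int) = ((s / 5 : Nat) : Int)) := by
        have : s / 5 ≠ g := by omega
        intro hcon
        exact this (by exact_mod_cast hcon.symm)
      rw [hfd, hrow, if_neg hgq]
      rw [show 5 * (g + 1) - s = 0 by omega, show 5 * (g + 1) - (s + 1) = 0 by omega]
      simp [pvCol]

-- hit count of (g, j) over a suffix of rows starting at global index s ≤ 5*g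
lemma hits_count_le (g j : Nat) : ∀ (rows : List String) (s : Nat), s ≤ 5 * g →
    (((PySem.List.enumerate rows (s : Int)).flatMap (fun rrow =>
        ((PySem.List.enumerate rrow.2.toList).filter (fun jc => jc.2 == '#')).map
          (fun jc => (PySem.Int.floordiv rrow.1 5, jc.1)))).count ((g : Int), (j : Int)))
      = (pvCol ((rows.drop (5 * g - s)).take 5) j).toNat := by
  intro rows
  induction rows with
  | nil =>
    intro s _
    simp [PySem.List.enumerate_nil, pvCol]
  | cons row rest ih =>
    intro s hs
    by_cases hse : s = 5 * g
    · subst hse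
      rw [show 5 * g - 5 * g = 0 by omega, List.drop_zero]
      have := hits_count_ge g j (row :: rest) (5 * g) le_rfl
      rw [show 5 * (g + 1) - 5 * g = 5 by omega] at this
      exact this
    · have hslt : s < 5 * g := by omega
      rw [PySem.List.enumerate_cons, List.flatMap_cons, List.count_append]
      rw [show (((s : Int), row) : Int × String).2 = row from rfl,
          show (((s : Int), row) : Int × String).1 = (s : Int) from rfl]
      have hfd : PySem.Int.floordiv ((s : Int)) 5 = ((s / 5 : Nat) : Int) := by
        exact_mod_cast PySem.Int.floordiv_natCast s 5
      have hrow := row_count (((s / 5 : Nat) : Int)) g j row.toList 0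
      simp only [Nat.cast_zero] at hrow
      have hgq : ¬ ((g : Int) = ((s / 5 : Nat) : Int)) := by
        have : s / 5 ≠ g := by omega
        intro hcon
        exact this (by exact_mod_cast hcon.symm)
      rw [hfd, hrow, if_neg hgq]
      rw [show ((s : Int) + 1) = ((s + 1 : Nat) : Int) by push_cast; ring,
        ih (s + 1) (by omega)]
      rw [show 5 * g - s = (5 * g - (s + 1)) + 1 by omega, List.drop_succ_cons]
      omega

lemma B_closed (arr : List String) : get_column_sum_alt arr = pvClosed arr := by
  unfold get_column_sum_alt pvClosed
  rw [PySem.Dict.foldl_insert_getD_add_one_eq_counter]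
  rw [show ((arr.length : Int) + 4) = ((arr.length + 4 : Nat) : Int) by push_cast; ring,
    show PySem.Int.floordiv ((arr.length + 4 : Nat) : Int) 5 = (((arr.length + 4) / 5 : Nat) : Int) from
      by exact_mod_cast PySem.Int.floordiv_natCast (arr.length + 4) 5,
    PySem.List.pyRange_zero_natCast, List.map_map]
  apply List.map_congr_left
  intro g hg
  rw [List.mem_range] at hg
  simp only [Function.comp]
  rw [show (5 * ((g : Nat) : Int)) = ((5 * g : Nat) : Int) by push_cast; ring,
    PySem.List.pyGetD_natCast, PySem.Str.len_eq, PySem.List.pyRange_zero_natCast, List.map_map]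
  apply List.map_congr_left
  intro j _
  simp only [Function.comp]
  rw [PySem.Dict.getD_counter]
  have hcnt := hits_count_le g j arr 0 (by omega)
  rw [Nat.sub_zero] at hcnt
  have : pvB_hits arr = ((PySem.List.enumerate arr ((0 : Nat) : Int)).flatMap (fun rrow =>
      ((PySem.List.enumerate rrow.2.toList).filter (fun jc => jc.2 == '#')).map
        (fun jc => (PySem.Int.floordiv rrow.1 5, jc.1)))) := by
    unfold pvB_hits
    norm_num
  rw [this, hcnt]
  have := pvCol_nonneg ((arr.drop (5 * g)).take 5) j
  omega

-- ===== VERDICT (by name: the statement is the Claim_ definition above) =====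
theorem get_column_sum_spec : Claim_equal_get_column_sum := by
  intro arr _ hpre
  unfold Spec_get_column_sum
  rw [A_closed arr hpre, B_closed arr]
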